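-- pv_equiv track=rewrite | github.com/guicho271828/mellea | mellea/formatters/granite/intrinsics/input.py | mark_sentence_boundaries
-- ===== SOURCE A (Python) =====
-- def sentence_delimiter(tag, sentence_num) -> str:
--     """Return a tag string that identifies the beginning of the indicated sentence.
--
--     Args:
--         tag: Tag string prefix, e.g. ``"i"`` or ``"c"``.
--         sentence_num: Zero-based index of the sentence.
--
--     Returns:
--         Tag string (including trailing space) that identifies the beginning of
--         the indicated sentence in sentence-tagged text.
--     """
--     return f"<{tag}{sentence_num}> "
--
-- def mark_sentence_boundaries(
--     split_strings: list[list[str]], tag_prefix: str, index: int = 0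
-- ) -> tuple[list[str], int]:
--     """Modify input strings by inserting sentence boundary markers.
--
--     Modify one or more input strings by inserting a tag in the form
--     ``<[prefix][number]>``
--     at the location of each sentence boundary.
--
--     :param split_strings: Input string(s), pre-split into sentences
--     :param tag_prefix: String to place before the number part of each tagged
--         sentence boundary.
--     :param index: Starting index for sentence numbering. Defaults to 0. Pass a
--         non-zero value to continue numbering from a prior call.
--
--     :returns: Tuple of (list of input strings with all sentence boundaries marked,
--         next available index after the last sentence).
--     """
--     result: list[str] = []
--     for sentences in split_strings:
--         to_concat = []
--         for sentence in sentences: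
--             to_concat.append(f"{sentence_delimiter(tag_prefix, index)}{sentence}")
--             index += 1
--         result.append(" ".join(to_concat))
--     return result, index
-- ===== SOURCE B (Python) =====
-- def mark_sentence_boundaries(
--     split_strings: list[list[str]], tag_prefix: str, index: int = 0
-- ) -> tuple[list[str], int]:
--     """Recursive decomposition: tag the first group, recurse on the rest
--     with the index advanced by the group length (no mutable counter)."""
--     if not split_strings:
--         return [], index
--     first, rest = split_strings[0], split_strings[1:]
--     marked = " ".join(
--         f"<{tag_prefix}{j}> {s}" for j, s in enumerate(first, index)
--     )
--     tail, final = mark_sentence_boundaries(rest, tag_prefix, index + len(first))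
--     return [marked] + tail, final
-- ===== Notes on version B (the rewrite author's own statement) =====
-- stated objective: alternative
-- what changed: Replaced the iterative double loop with a cross-iteration mutable counter by a recursive decomposition: each group is tagged independently via enumerate(group, base) and the recursion advances the base by the group length.
import Mathlib
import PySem

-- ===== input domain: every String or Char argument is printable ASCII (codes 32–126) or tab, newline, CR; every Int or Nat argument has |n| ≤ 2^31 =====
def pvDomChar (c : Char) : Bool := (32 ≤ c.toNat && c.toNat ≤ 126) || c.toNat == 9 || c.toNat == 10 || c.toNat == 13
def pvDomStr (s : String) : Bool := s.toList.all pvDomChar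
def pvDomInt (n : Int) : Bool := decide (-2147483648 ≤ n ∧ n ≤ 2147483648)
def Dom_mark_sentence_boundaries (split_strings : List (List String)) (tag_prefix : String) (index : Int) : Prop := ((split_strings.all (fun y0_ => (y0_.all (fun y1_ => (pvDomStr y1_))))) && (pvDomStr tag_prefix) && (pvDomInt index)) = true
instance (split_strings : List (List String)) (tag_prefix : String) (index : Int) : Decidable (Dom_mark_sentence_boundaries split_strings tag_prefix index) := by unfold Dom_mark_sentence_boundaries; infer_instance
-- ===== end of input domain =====

-- B replaces A's double loop with a mutable counter by structural recursion with per-group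
-- enumerate(group, base); same cost, different decomposition. Equivalence proved on all inputs.

-- ===== PORT A =====
def sentence_delimiter (tag : String) (sentence_num : Int) : String :=
  "<" ++ tag ++ PySem.Int.toStr sentence_num ++ "> "

def mark_sentence_boundaries (split_strings : List (List String)) (tag_prefix : String) (index : Int) : List String × Int :=
  let st := split_strings.foldl
    (fun (acc : List String × Int) sentences =>
      let inner := sentences.foldl
        (fun (p : List String × Int) sentence =>
          (p.1 ++ [sentence_delimiter tag_prefix p.2 ++ sentence], p.2 + 1))
        (([] : List String), acc.2)
      (acc.1 ++ [PySem.Str.join " " inner.1], inner.2))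
    (([] : List String), index)
  st

-- ===== PORT B =====
def mark_sentence_boundaries_alt (split_strings : List (List String)) (tag_prefix : String) (index : Int) : List String × Int :=
  match split_strings with
  | [] => ([], index)
  | first :: rest =>
    let marked := PySem.Str.join " "
      ((PySem.List.enumerate first index).map
        (fun js => "<" ++ tag_prefix ++ PySem.Int.toStr js.1 ++ "> " ++ js.2))
    let t := mark_sentence_boundaries_alt rest tag_prefix (index + (first.length : Int))
    ([marked] ++ t.1, t.2)

-- ===== PRECONDITION & SPEC =====
def Spec_mark_sentence_boundaries (split_strings : List (List String)) (tag_prefix : String) (index : Int) (out : List String × Int) : Prop := out = mark_sentence_boundaries_alt split_strings tag_prefix index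
instance (split_strings : List (List String)) (tag_prefix : String) (index : Int) (out : List String × Int) : Decidable (Spec_mark_sentence_boundaries split_strings tag_prefix index out) := by unfold Spec_mark_sentence_boundaries; infer_instance

-- ===== CLAIM (what is proved, stated in full; the proofs are below) =====
def Claim_equal_mark_sentence_boundaries : Prop := ∀ (split_strings : List (List String)) (tag_prefix : String) (index : Int), Dom_mark_sentence_boundaries split_strings tag_prefix index → Spec_mark_sentence_boundaries split_strings tag_prefix index (mark_sentence_boundaries split_strings tag_prefix index)

-- ===== LEMMAS AND PROOFS =====

-- A's inner loop from counter idx equals B's map over enumerate with start idx.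
theorem msb_inner (tp : String) (g : List String) (idx : Int) (pre : List String) :
    g.foldl (fun (p : List String × Int) sentence =>
        (p.1 ++ [sentence_delimiter tp p.2 ++ sentence], p.2 + 1)) (pre, idx)
      = (pre ++ (PySem.List.enumerate g idx).map
          (fun js => "<" ++ tp ++ PySem.Int.toStr js.1 ++ "> " ++ js.2),
         idx + (g.length : Int)) := by
  induction g generalizing idx pre with
  | nil => simp [PySem.List.enumerate_nil]
  | cons s g ih =>
    simp only [List.foldl_cons, ih, PySem.List.enumerate_cons, List.map_cons, Prod.mk.injEq]
    constructor
    · simp [sentence_delimiter, String.append_assoc]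
    · simp [List.length_cons]; omega

-- A's outer loop with the inner loop replaced by its closed form (msb_inner).
theorem msb_outer' (tp : String) (ss : List (List String)) (idx : Int) (pre : List String) :
    ss.foldl (fun (acc : List String × Int) sentences =>
        (acc.1 ++ [PySem.Str.join " "
            ((PySem.List.enumerate sentences acc.2).map
              (fun js => "<" ++ tp ++ PySem.Int.toStr js.1 ++ "> " ++ js.2))],
          acc.2 + (sentences.length : Int))) (pre, idx)
      = (pre ++ (mark_sentence_boundaries_alt ss tp idx).1,
         (mark_sentence_boundaries_alt ss tp idx).2) := by
  induction ss generalizing idx pre with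
  | nil => simp [mark_sentence_boundaries_alt]
  | cons g ss ih => simp [List.foldl_cons, ih, mark_sentence_boundaries_alt]

-- A's outer step function equals its closed form, pointwise.
theorem msb_fun_eq (tp : String) :
    (fun (acc : List String × Int) sentences =>
        let inner := sentences.foldl
          (fun (p : List String × Int) sentence =>
            (p.1 ++ [sentence_delimiter tp p.2 ++ sentence], p.2 + 1))
          (([] : List String), acc.2)
        (acc.1 ++ [PySem.Str.join " " inner.1], inner.2))
      = (fun (acc : List String × Int) sentences =>
        (acc.1 ++ [PySem.Str.join " "
            ((PySem.List.enumerate sentences acc.2).map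
              (fun js => "<" ++ tp ++ PySem.Int.toStr js.1 ++ "> " ++ js.2))],
          acc.2 + (sentences.length : Int))) := by
  funext acc sentences
  simp only [msb_inner, List.nil_append]

-- ===== VERDICT (by name: the statement is the Claim_ definition above) =====
theorem mark_sentence_boundaries_spec : Claim_equal_mark_sentence_boundaries := by
  intro ss tp idx _
  unfold Spec_mark_sentence_boundaries mark_sentence_boundaries
  rw [msb_fun_eq, msb_outer']
  simp
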